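-- pv_equiv track=rewrite | github.com/Immortalsun/Advent-of-code | 2025/P6/p6Code.py | get_operators_array
-- ===== SOURCE A (Python) =====
-- def get_operators_array(input_string):
--     curr_operator_str = ""
--     op_array = []
--     for char in input_string:
--         if char == "+" or char == "*":
--             curr_operator_str += char
--         elif curr_operator_str != "":
--             op_array.append(curr_operator_str)
--             curr_operator_str = ""
--
--     if curr_operator_str != "":
--         op_array.append(curr_operator_str)
--
--     return op_array
-- ===== SOURCE B (Python) =====
-- def get_operators_array(input_string):
--     # Run-partitioning scan: find each maximal run of same-key chars with two
--     # indices and emit operator runs whole, instead of a char-by-char accumulator.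
--     result = []
--     i = 0
--     n = len(input_string)
--     while i < n:
--         is_op = input_string[i] in ('+', '*')
--         j = i + 1
--         while j < n and (input_string[j] in ('+', '*')) == is_op:
--             j += 1
--         if is_op:
--             result.append(input_string[i:j])
--         i = j
--     return result
-- ===== Notes on version B (the rewrite author's own statement) =====
-- stated objective: alternative
-- what changed: Replaced the char-by-char accumulator-and-flush loop with a run-partitioning scan that locates each maximal run of same-key characters with two indices and emits operator runs whole.
import Mathlib
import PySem

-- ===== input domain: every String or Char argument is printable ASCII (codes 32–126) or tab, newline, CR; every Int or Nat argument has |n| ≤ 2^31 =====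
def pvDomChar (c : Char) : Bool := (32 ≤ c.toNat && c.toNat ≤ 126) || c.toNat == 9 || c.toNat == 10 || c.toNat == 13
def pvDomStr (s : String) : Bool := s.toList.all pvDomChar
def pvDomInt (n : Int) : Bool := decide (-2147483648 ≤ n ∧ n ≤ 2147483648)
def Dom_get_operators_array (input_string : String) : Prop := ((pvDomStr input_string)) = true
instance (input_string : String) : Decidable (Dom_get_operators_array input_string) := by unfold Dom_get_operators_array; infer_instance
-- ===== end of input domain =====

-- B replaces A's char-by-char accumulator/flush loop with a run-partitioning scan
-- that finds each maximal run of same-key characters and emits operator runs whole.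

-- ===== PORT A =====
-- loop body of A: build curr_operator_str char by char, flush it on a non-operator char
def aStep (st : String × List String) (c : Char) : String × List String :=
  if c = '+' ∨ c = '*' then (st.1.push c, st.2)
  else if st.1 ≠ "" then ("", st.2 ++ [st.1])
  else st

-- Literal port of A: fold over the chars keeping (curr_operator_str, op_array), final flush.
def get_operators_array (input_string : String) : List String :=
  let p := input_string.toList.foldl aStep ("", [])
  if p.1 ≠ "" then p.2 ++ [p.1] else p.2

-- ===== PORT B =====
def isOpChar (c : Char) : Bool := c == '+' || c == '*'

-- B's run scanner: takeWhile/dropWhile on the same key = B's inner j-scan over a run.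
def opGroups : List Char → List String
  | [] => []
  | c :: rest =>
      let run := rest.takeWhile (fun x => isOpChar x == isOpChar c)
      let rest' := rest.dropWhile (fun x => isOpChar x == isOpChar c)
      if isOpChar c then String.ofList (c :: run) :: opGroups rest'
      else opGroups rest'
termination_by l => l.length
decreasing_by
  all_goals
    simp only [List.length_cons]
    exact Nat.lt_succ_of_le (List.length_dropWhile_le _ _)

def get_operators_array_alt (input_string : String) : List String :=
  opGroups input_string.toList

-- ===== PRECONDITION & SPEC =====
def Spec_get_operators_array (input_string : String) (out : List String) : Prop := out = get_operators_array_alt input_string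
instance (input_string : String) (out : List String) : Decidable (Spec_get_operators_array input_string out) := by unfold Spec_get_operators_array; infer_instance

-- ===== CLAIM (what is proved, stated in full; the proofs are below) =====
def Claim_equal_get_operators_array : Prop := ∀ (input_string : String), Dom_get_operators_array input_string → Spec_get_operators_array input_string (get_operators_array input_string)

-- ===== LEMMAS AND PROOFS =====

theorem ofList_nil_str : String.ofList ([] : List Char) = "" := by simp

theorem ofList_push (l : List Char) (c : Char) :
    (String.ofList l).push c = String.ofList (l ++ [c]) := by
  have h : ((String.ofList l).push c).toList = (String.ofList (l ++ [c])).toList := by simp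
  exact String.toList_inj.mp h

theorem ofList_ne_empty (d : Char) (t : List Char) :
    String.ofList (d :: t) ≠ "" := by simp

theorem aStep_op (st : String × List String) (c : Char) (h : c = '+' ∨ c = '*') :
    aStep st c = (st.1.push c, st.2) := by
  simp [aStep, h]

theorem aStep_skip (s : String) (arr : List String) (c : Char)
    (h : ¬ (c = '+' ∨ c = '*')) (hs : s = "") :
    aStep (s, arr) c = (s, arr) := by
  simp [aStep, h, hs]

theorem aStep_flush (s : String) (arr : List String) (c : Char)
    (h : ¬ (c = '+' ∨ c = '*')) (hs : s ≠ "") :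
    aStep (s, arr) c = ("", arr ++ [s]) := by
  simp [aStep, h, hs]

theorem opGroups_nil : opGroups [] = [] := by simp [opGroups]

theorem opGroups_cons (c : Char) (rest : List Char) :
    opGroups (c :: rest) =
      if isOpChar c then
        String.ofList (c :: rest.takeWhile (fun x => isOpChar x == isOpChar c))
          :: opGroups (rest.dropWhile (fun x => isOpChar x == isOpChar c))
      else opGroups (rest.dropWhile (fun x => isOpChar x == isOpChar c)) := by
  rw [opGroups]

-- skipping a non-operator run changes nothing
theorem opGroups_dropNonop (rest : List Char) :
    opGroups (rest.dropWhile (fun x => isOpChar x == false)) = opGroups rest := by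
  cases rest with
  | nil => simp
  | cons c r =>
    by_cases h : isOpChar c = true
    · simp [List.dropWhile_cons, h]
    · simp only [Bool.not_eq_true] at h
      simp [List.dropWhile_cons, h, opGroups_cons]

-- an all-operator nonempty run is one group
theorem opGroups_allOp (c : Char) (cur : List Char)
    (hc : isOpChar c = true) (hcur : ∀ x ∈ cur, isOpChar x = true) :
    opGroups (c :: cur) = [String.ofList (c :: cur)] := by
  rw [opGroups_cons, if_pos hc]
  have ht : cur.takeWhile (fun x => isOpChar x == isOpChar c) = cur := by
    apply List.takeWhile_eq_self_iff.mpr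
    intro x hx; simp [hcur x hx, hc]
  have hd : cur.dropWhile (fun x => isOpChar x == isOpChar c) = [] := by
    apply List.dropWhile_eq_nil_iff.mpr
    intro x hx; simp [hcur x hx, hc]
  simp [ht, hd, opGroups_nil]

theorem takeWhile_append_all {p : Char → Bool} (l1 l2 : List Char)
    (h : ∀ x ∈ l1, p x = true) :
    (l1 ++ l2).takeWhile p = l1 ++ l2.takeWhile p := by
  induction l1 with
  | nil => simp
  | cons a t ih =>
    simp only [List.cons_append, List.takeWhile_cons, h a (by simp)]
    simp [ih (fun x hx => h x (by simp [hx]))]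

theorem dropWhile_append_all {p : Char → Bool} (l1 l2 : List Char)
    (h : ∀ x ∈ l1, p x = true) :
    (l1 ++ l2).dropWhile p = l2.dropWhile p := by
  induction l1 with
  | nil => simp
  | cons a t ih =>
    simp only [List.cons_append, List.dropWhile_cons, h a (by simp)]
    exact ih (fun x hx => h x (by simp [hx]))

-- pending all-operator run followed by a non-operator char: flush it as one group
theorem opGroups_flush (d : Char) (cur : List Char) (c : Char) (rest : List Char)
    (hd : isOpChar d = true) (hcur : ∀ x ∈ cur, isOpChar x = true)
    (hc : isOpChar c = false) :
    opGroups (d :: cur ++ c :: rest) = String.ofList (d :: cur) :: opGroups rest := by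
  rw [List.cons_append, opGroups_cons, if_pos hd]
  have ht : (cur ++ c :: rest).takeWhile (fun x => isOpChar x == isOpChar d) = cur := by
    rw [takeWhile_append_all cur _ (fun x hx => by simp [hcur x hx, hd])]
    simp [hc, hd]
  have hdrop : (cur ++ c :: rest).dropWhile (fun x => isOpChar x == isOpChar d) = c :: rest := by
    rw [dropWhile_append_all cur _ (fun x hx => by simp [hcur x hx, hd])]
    simp [hc, hd]
  rw [ht, hdrop, opGroups_cons, if_neg (by simp [hc])]
  simp only [hc]
  rw [opGroups_dropNonop]

-- A's final flush of the fold result, written without a `let` for easy rewriting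
def aFinish (p : String × List String) : List String :=
  if p.1 ≠ "" then p.2 ++ [p.1] else p.2

-- main invariant relating A's fold state to B's groups
theorem main_inv (l : List Char) : ∀ (cur : List Char) (arr : List String),
    (∀ x ∈ cur, isOpChar x = true) →
    aFinish (l.foldl aStep (String.ofList cur, arr))
      = arr ++ (if cur.isEmpty then opGroups l else opGroups (cur ++ l)) := by
  induction l with
  | nil =>
    intro cur arr hcur
    cases cur with
    | nil => simp [aFinish, opGroups_nil]
    | cons d t =>
      simp only [List.foldl_nil, aFinish]
      rw [if_pos (show String.ofList (d :: t) ≠ "" from ofList_ne_empty d t)]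
      rw [if_neg (show ¬((d :: t).isEmpty = true) by simp)]
      rw [show (d :: t) ++ ([] : List Char) = d :: t from by simp]
      rw [opGroups_allOp d t (hcur d (by simp)) (fun x hx => hcur x (by simp [hx]))]
  | cons c rest ih =>
    intro cur arr hcur
    by_cases hc : c = '+' ∨ c = '*'
    · have hop : isOpChar c = true := by
        rcases hc with h | h <;> simp [isOpChar, h]
      rw [List.foldl_cons, aStep_op _ c hc]
      have hacc : ((String.ofList cur, arr).1.push c, (String.ofList cur, arr).2)
          = (String.ofList (cur ++ [c]), arr) := by
        simp [ofList_push]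
      rw [hacc]
      rw [ih (cur ++ [c]) arr (by intro x hx; rcases List.mem_append.mp hx with h | h
                                  · exact hcur x h
                                  · simp at h; subst h; exact hop)]
      congr 1
      cases cur with
      | nil => simp
      | cons d t => simp [List.append_assoc]
    · have hop : isOpChar c = false := by
        simp [isOpChar] at hc ⊢
        exact hc
      cases cur with
      | nil =>
        rw [List.foldl_cons, ofList_nil_str, aStep_skip "" arr c hc rfl]
        have ih' := ih [] arr (by simp)
        rw [ofList_nil_str] at ih'
        rw [ih']
        have hskip : opGroups (c :: rest) = opGroups rest := by
          rw [opGroups_cons, hop, if_neg (by simp), opGroups_dropNonop]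
        simp [hskip]
      | cons d t =>
        rw [List.foldl_cons,
          aStep_flush (String.ofList (d :: t)) arr c hc (ofList_ne_empty d t)]
        have ih' := ih [] (arr ++ [String.ofList (d :: t)]) (by simp)
        rw [ofList_nil_str] at ih'
        rw [ih']
        have hflush : opGroups (d :: (t ++ c :: rest)) = String.ofList (d :: t) :: opGroups rest := by
          rw [← List.cons_append]
          exact opGroups_flush d t c rest (hcur d (by simp))
            (fun x hx => hcur x (by simp [hx])) hop
        simp [hflush]

-- ===== VERDICT (by name: the statement is the Claim_ definition above) =====
theorem get_operators_array_spec : Claim_equal_get_operators_array := by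
  intro s _
  unfold Spec_get_operators_array
  have h := main_inv s.toList [] [] (by simp)
  rw [ofList_nil_str] at h
  simpa [get_operators_array, get_operators_array_alt, aFinish] using h
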